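-- pv_equiv track=rewrite | github.com/mwoss/midi-generator | musicgenerator/pianomidigenerator.py | time_fix_sample
-- ===== SOURCE A (Python) =====
-- import copy
--
-- def time_fix_sample(sample, endtime, speed):
--     length = len(sample) - 1
--     fix = copy.deepcopy(sample)
--     for i in range(0, length):
--         if fix[i][0] == fix[i + 1][0]:
--             fix[i][0] = endtime
--         else:
--             fix[i][0] = endtime
--             endtime += speed
--
--     fix[length][0] = fix[length - 1][0]
--     return fix
-- ===== SOURCE B (Python) =====
-- def time_fix_sample(sample, endtime, speed):
--     body, last = sample[:-1], sample[-1]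
--     # stage 1: run-length decomposition of body by equal first element
--     runs, cur = [], []
--     for row in body:
--         if cur and cur[-1][0] == row[0]:
--             cur = cur + [row]
--         else:
--             if cur:
--                 runs = runs + [cur]
--             cur = [row]
--     if cur:
--         runs = runs + [cur]
--     # stage 2: each run g gets the time endtime + speed * g
--     out = []
--     for g, run in enumerate(runs):
--         t = endtime + speed * g
--         for row in run:
--             out = out + [[t] + row[1:]]
--     # stage 3: the last row copies the previous row's new time (itself if alone)
--     last_time = out[-1][0] if out else last[0]
--     return out + [[last_time] + last[1:]]
-- ===== Notes on version B (the rewrite author's own statement) =====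
-- stated objective: alternative
-- what changed: B is a staged run-length decomposition: it first groups the body rows into maximal runs of equal first element, then rebuilds fresh rows assigning each run the time endtime + speed * run_index, then appends the last row copying the previous row's time, instead of A's single index loop mutating a deepcopy with a running endtime accumulator.
import Mathlib
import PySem

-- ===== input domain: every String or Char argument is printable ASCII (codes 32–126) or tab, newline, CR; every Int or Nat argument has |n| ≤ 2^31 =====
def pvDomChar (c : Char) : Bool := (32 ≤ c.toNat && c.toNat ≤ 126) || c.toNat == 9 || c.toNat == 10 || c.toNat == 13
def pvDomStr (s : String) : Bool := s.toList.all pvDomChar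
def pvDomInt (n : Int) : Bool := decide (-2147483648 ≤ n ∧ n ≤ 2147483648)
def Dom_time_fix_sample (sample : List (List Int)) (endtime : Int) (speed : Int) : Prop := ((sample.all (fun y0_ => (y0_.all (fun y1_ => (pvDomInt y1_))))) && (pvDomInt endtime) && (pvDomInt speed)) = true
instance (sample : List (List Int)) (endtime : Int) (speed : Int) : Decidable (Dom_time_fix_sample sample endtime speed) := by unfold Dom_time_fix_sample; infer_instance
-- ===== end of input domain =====

-- B replaces A's single index loop over a mutated deepcopy (running endtime accumulator) by a staged
-- run-length decomposition: group body rows into runs of equal first element, then rebuild fresh rows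
-- giving run g the time endtime + speed * g, then append the last row copying the previous time ("alternative").

-- ===== PORT A =====
-- fix[i][0] (possibly negative i, as in Python; total forms, in range under Pre_)
def pvGetFst (fix : List (List Int)) (i : Int) : Int :=
  PySem.List.pyGetD (PySem.List.pyGetD fix i []) 0 0

-- fix[i][0] = v
def pvSetFst (fix : List (List Int)) (i : Int) (v : Int) : List (List Int) :=
  PySem.List.pySetD fix i (PySem.List.pySetD (PySem.List.pyGetD fix i []) 0 v)

def time_fix_sample (sample : List (List Int)) (endtime : Int) (speed : Int) : List (List Int) :=
  let length : Int := (sample.length : Int) - 1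
  let st := (PySem.List.pyRange 0 length 1).foldl
    (fun (st : List (List Int) × Int) (i : Int) =>
      if pvGetFst st.1 i = pvGetFst st.1 (i + 1) then
        (pvSetFst st.1 i st.2, st.2)
      else
        (pvSetFst st.1 i st.2, st.2 + speed))
    (sample, endtime)
  pvSetFst st.1 length (pvGetFst st.1 (length - 1))

-- ===== PORT B =====
-- the loop body of B's stage-1 fold, named
def pvStep (st : List (List (List Int)) × List (List Int)) (row : List Int) :
    List (List (List Int)) × List (List Int) :=
  if st.2 ≠ [] ∧ PySem.List.pyGetD (PySem.List.pyGetD st.2 (-1) []) 0 0 = PySem.List.pyGetD row 0 0 then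
    (st.1, st.2 ++ [row])
  else
    ((if st.2 ≠ [] then st.1 ++ [st.2] else st.1), [row])

def time_fix_sample_alt (sample : List (List Int)) (endtime : Int) (speed : Int) : List (List Int) :=
  let body := PySem.List.slice sample none (some (-1))
  let last := PySem.List.pyGetD sample (-1) []
  -- stage 1: run-length decomposition of body by equal first element
  let rc := body.foldl pvStep ([], [])
  let runs := if rc.2 ≠ [] then rc.1 ++ [rc.2] else rc.1
  -- stage 2: each run g gets the time endtime + speed * g
  let out := (PySem.List.enumerate runs).foldl
    (fun out (p : Int × List (List Int)) =>
      p.2.foldl (fun out row => out ++ [(endtime + speed * p.1) :: PySem.List.slice row (some 1) none]) out)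
    []
  -- stage 3: the last row copies the previous row's new time (itself if alone)
  let last_time := if out ≠ [] then PySem.List.pyGetD (PySem.List.pyGetD out (-1) []) 0 0
                   else PySem.List.pyGetD last 0 0
  out ++ [last_time :: PySem.List.slice last (some 1) none]

-- ===== PRECONDITION & SPEC =====
-- A indexes fix[length][0] / fix[i][0]: it raises IndexError on the empty list and on any empty row.
def Pre_time_fix_sample (sample : List (List Int)) (endtime : Int) (speed : Int) : Prop :=
  sample ≠ [] ∧ ∀ r ∈ sample, r ≠ []
instance (sample : List (List Int)) (endtime : Int) (speed : Int) : Decidable (Pre_time_fix_sample sample endtime speed) := by unfold Pre_time_fix_sample; infer_instance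

def pvWitness_time_fix_sample : List (List Int) × Int × Int := ([[0, 1], [0, 2], [4, 3]], 10, 2)

def Spec_time_fix_sample (sample : List (List Int)) (endtime : Int) (speed : Int) (out : List (List Int)) : Prop := out = time_fix_sample_alt sample endtime speed
instance (sample : List (List Int)) (endtime : Int) (speed : Int) (out : List (List Int)) : Decidable (Spec_time_fix_sample sample endtime speed out) := by unfold Spec_time_fix_sample; infer_instance

-- ===== CLAIM (what is proved, stated in full; the proofs are below) =====
def Claim_equal_time_fix_sample : Prop := ∀ (sample : List (List Int)) (endtime : Int) (speed : Int), Dom_time_fix_sample sample endtime speed → Pre_time_fix_sample sample endtime speed → Spec_time_fix_sample sample endtime speed (time_fix_sample sample endtime speed)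

-- ===== LEMMAS AND PROOFS =====
-- first column, boundary count, new time values, and the common reference output (proof-only)
def pvFs (sample : List (List Int)) : List Int := sample.map (fun row => PySem.List.pyGetD row 0 0)
def pvCnt (sample : List (List Int)) (m : Nat) : Nat :=
  (List.range m).countP (fun j => decide ((pvFs sample).getD j 0 ≠ (pvFs sample).getD (j + 1) 0))
def pvNT (sample : List (List Int)) (e s : Int) (j : Nat) : Int := e + s * (pvCnt sample j : Int)
theorem pvCnt_succ (sample : List (List Int)) (m : Nat) :
    pvCnt sample (m + 1) =
      pvCnt sample m + (if (pvFs sample).getD m 0 ≠ (pvFs sample).getD (m + 1) 0 then 1 else 0) := by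
  simp [pvCnt, List.range_succ, List.countP_append, List.countP_singleton]

def pvUpd (sample : List (List Int)) (e s : Int) (m : Nat) : List (List Int) :=
  (List.range sample.length).map (fun j =>
    if j < m then pvNT sample e s j :: (sample.getD j []).tail else sample.getD j [])

theorem pvSet_zero_of_ne_nil {row : List Int} (h : row ≠ []) (v : Int) :
    row.set 0 v = v :: row.tail := by
  cases row with
  | nil => exact absurd rfl h
  | cons a t => rfl

theorem pvFs_getD (sample : List (List Int)) (j : Nat) (hj : j < sample.length) :
    (pvFs sample).getD j 0 = PySem.List.pyGetD (sample.getD j []) 0 0 := by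
  simp [pvFs, List.getD_eq_getElem?_getD, List.getElem?_map, List.getElem?_eq_getElem hj]

theorem pvRow_ne_nil (sample : List (List Int)) (j : Nat) (hj : j < sample.length)
    (hr : ∀ r ∈ sample, r ≠ []) : sample.getD j [] ≠ [] := by
  apply hr
  rw [List.getD_eq_getElem _ _ hj]; exact List.getElem_mem hj

-- pvUpd at an index ≥ m is the original row
theorem pvUpd_getD_ge (sample : List (List Int)) (e s : Int) (m j : Nat)
    (hj : j < sample.length) (hge : m ≤ j) :
    (pvUpd sample e s m).getD j [] = sample.getD j [] := by
  rw [pvUpd, List.getD_eq_getElem _ _ (by simpa using hj)]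
  simp [List.getElem_map, List.getElem_range, Nat.not_lt.mpr hge]

theorem pvUpd_length (sample : List (List Int)) (e s : Int) (m : Nat) :
    (pvUpd sample e s m).length = sample.length := by simp [pvUpd]

theorem pvUpd_getElem (sample : List (List Int)) (e s : Int) (m j : Nat)
    (hj : j < (pvUpd sample e s m).length) :
    (pvUpd sample e s m)[j] =
      if j < m then pvNT sample e s j :: (sample.getD j []).tail else sample.getD j [] := by
  simp [pvUpd]

theorem pvA_loop (sample : List (List Int)) (e s : Int) (hr : ∀ r ∈ sample, r ≠ [])
    (m : Nat) (hm : m + 1 ≤ sample.length) :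
    (PySem.List.pyRange 0 (m : Int) 1).foldl
      (fun (st : List (List Int) × Int) (i : Int) =>
        if pvGetFst st.1 i = pvGetFst st.1 (i + 1) then
          (pvSetFst st.1 i st.2, st.2)
        else
          (pvSetFst st.1 i st.2, st.2 + s))
      (sample, e)
    = (pvUpd sample e s m, e + s * (pvCnt sample m : Int)) := by
  induction m with
  | zero =>
    rw [show ((0:Nat):Int) = 0 by simp, PySem.List.pyRange_one_eq_nil le_rfl, List.foldl_nil]
    simp only [Prod.mk.injEq]
    refine ⟨?_, by simp [pvCnt]⟩
    apply List.ext_getElem (by simp [pvUpd])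
    intro j hj hj'
    rw [pvUpd_getElem sample e s 0 j hj']
    simp [List.getElem?_eq_getElem hj]
  | succ m ih =>
    have hm' : m + 1 ≤ sample.length := by omega
    have hmlt : m < sample.length := by omega
    have hm1lt : m + 1 < sample.length := by omega
    rw [show ((m + 1 : Nat) : Int) = (m : Int) + 1 by push_cast; ring,
      PySem.List.pyRange_one_succ_right (by positivity), List.foldl_append, ih hm']
    simp only [List.foldl_cons, List.foldl_nil]
    have hg1 : pvGetFst (pvUpd sample e s m) (m : Int) = (pvFs sample).getD m 0 := by
      unfold pvGetFst
      rw [PySem.List.pyGetD_natCast, pvUpd_getD_ge sample e s m m hmlt le_rfl,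
        ← pvFs_getD sample m hmlt]
    have hg2 : pvGetFst (pvUpd sample e s m) ((m : Int) + 1) = (pvFs sample).getD (m + 1) 0 := by
      unfold pvGetFst
      rw [show ((m : Int) + 1) = ((m + 1 : Nat) : Int) by push_cast; ring,
        PySem.List.pyGetD_natCast]
      rw [pvUpd_getD_ge sample e s m (m + 1) hm1lt (by omega),
        ← pvFs_getD sample (m + 1) hm1lt]
    have hset : pvSetFst (pvUpd sample e s m) (m : Int) (e + s * (pvCnt sample m : Int))
        = pvUpd sample e s (m + 1) := by
      unfold pvSetFst
      rw [PySem.List.pyGetD_natCast, pvUpd_getD_ge sample e s m m hmlt le_rfl,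
        PySem.List.pySetD_of_nonneg _ _ (by norm_num : (0:Int) ≤ 0),
        show (0:Int).toNat = 0 from rfl,
        pvSet_zero_of_ne_nil (pvRow_ne_nil sample m hmlt hr),
        PySem.List.pySetD_natCast]
      apply List.ext_getElem (by simp [pvUpd])
      intro j hj hj'
      rw [List.getElem_set, pvUpd_getElem sample e s (m+1) j hj']
      by_cases hjm : m = j
      · subst hjm
        simp [pvNT]
      · have hj2 : j < (pvUpd sample e s m).length := by
          rw [pvUpd_length]; rw [pvUpd_length] at hj'; omega
        rw [if_neg hjm, pvUpd_getElem sample e s m j hj2]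
        by_cases hlt : j < m
        · rw [if_pos hlt, if_pos (by omega)]
        · rw [if_neg hlt, if_neg (by omega)]
    rw [hg1, hg2]
    split_ifs with hb
    · have hc2 : pvCnt sample (m + 1) = pvCnt sample m := by
        rw [pvCnt_succ, if_neg (by rw [List.getD_eq_getElem?_getD, List.getD_eq_getElem?_getD] at hb; simp [hb])]; omega
      rw [hset, hc2]
    · have hc2 : ((pvCnt sample (m + 1) : Nat) : Int) = (pvCnt sample m : Int) + 1 := by
        rw [pvCnt_succ, if_pos (by simpa using hb)]; push_cast; ring
      rw [hset]
      congr 1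
      rw [hc2]; ring

def pvRef (sample : List (List Int)) (e s : Int) : List (List Int) :=
  (List.range sample.length).map (fun j =>
    (if j + 1 < sample.length then pvNT sample e s j
     else if sample.length = 1 then (pvFs sample).getD 0 0
     else pvNT sample e s (sample.length - 2)) :: (sample.getD j []).tail)

theorem pvUpd_zero (sample : List (List Int)) (e s : Int) : pvUpd sample e s 0 = sample := by
  apply List.ext_getElem (by simp [pvUpd])
  intro j hj hj'
  rw [pvUpd_getElem sample e s 0 j hj]
  simp [List.getElem?_eq_getElem hj']

theorem pvA_eq_ref (sample : List (List Int)) (e s : Int)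
    (h0 : sample ≠ []) (hr : ∀ r ∈ sample, r ≠ []) :
    time_fix_sample sample e s = pvRef sample e s := by
  have hn : 1 ≤ sample.length := List.length_pos_of_ne_nil h0
  unfold time_fix_sample
  dsimp only []
  rw [show (sample.length : Int) - 1 = ((sample.length - 1 : Nat) : Int) by omega]
  rw [pvA_loop sample e s hr (sample.length - 1) (by omega)]
  set M := sample.length - 1 with hM
  by_cases h1 : sample.length = 1
  · -- single row: the final write re-writes the head with its own value
    have hM0 : M = 0 := by omega
    rw [hM0, pvUpd_zero]
    have hg : pvGetFst sample (((0:Nat):Int) - 1) = (pvFs sample).getD 0 0 := by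
      unfold pvGetFst
      rw [show ((0:Nat):Int) - 1 = -1 by norm_num, PySem.List.pyGetD_neg_one _ _ h0]
      rw [List.getLast_eq_getElem]
      rw [← List.getD_eq_getElem _ [] (by omega), h1, ← pvFs_getD sample 0 (by omega)]
    rw [hg]
    unfold pvSetFst
    rw [show ((0:Nat):Int) = (0:Int) from rfl]
    rw [PySem.List.pySetD_of_nonneg _ _ (by norm_num : (0:Int) ≤ 0),
      PySem.List.pySetD_of_nonneg _ _ (by norm_num : (0:Int) ≤ 0)]
    rw [show (0:Int).toNat = 0 from rfl]
    have hrow0 : PySem.List.pyGetD sample 0 ([]:List Int) = sample.getD 0 [] := by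
      rw [show (0:Int) = ((0:Nat):Int) from rfl, PySem.List.pyGetD_natCast]
    rw [hrow0, pvSet_zero_of_ne_nil (pvRow_ne_nil sample 0 (by omega) hr)]
    apply List.ext_getElem (by simp [pvRef])
    intro j hj hj'
    have hj1 : j = 0 := by simp at hj; omega
    subst hj1
    rw [List.getElem_set]
    simp [pvRef, h1]
  · -- at least two rows
    have hM1 : 1 ≤ M := by omega
    have hMlt : M < sample.length := by omega
    have hg : pvGetFst (pvUpd sample e s M) ((M:Int) - 1) = pvNT sample e s (M - 1) := by
      unfold pvGetFst
      rw [show ((M:Int) - 1) = ((M - 1 : Nat) : Int) by omega, PySem.List.pyGetD_natCast]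
      have hlt : M - 1 < (pvUpd sample e s M).length := by rw [pvUpd_length]; omega
      rw [List.getD_eq_getElem _ _ hlt, pvUpd_getElem sample e s M (M-1) hlt,
        if_pos (by omega)]
      rw [PySem.List.pyGetD_zero_cons]
    rw [hg]
    unfold pvSetFst
    rw [PySem.List.pyGetD_natCast,
      pvUpd_getD_ge sample e s M M hMlt le_rfl,
      PySem.List.pySetD_of_nonneg _ _ (by norm_num : (0:Int) ≤ 0),
      show (0:Int).toNat = 0 from rfl,
      pvSet_zero_of_ne_nil (pvRow_ne_nil sample M hMlt hr),
      PySem.List.pySetD_natCast]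
    apply List.ext_getElem (by simp [pvRef, pvUpd])
    intro j hj hj'
    have hjn : j < sample.length := by
      simpa [pvUpd_length] using hj
    rw [List.getElem_set]
    have href : (pvRef sample e s)[j] =
        (if j + 1 < sample.length then pvNT sample e s j
         else if sample.length = 1 then (pvFs sample).getD 0 0
         else pvNT sample e s (sample.length - 2)) :: (sample.getD j []).tail := by
      simp [pvRef]
    rw [href]
    by_cases hjM : M = j
    · subst hjM
      rw [if_pos rfl, if_neg (by omega), if_neg h1]
      have : sample.length - 2 = M - 1 := by omega
      rw [this]
    · have hj2 : j < (pvUpd sample e s M).length := by rw [pvUpd_length]; omega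
      rw [if_neg hjM, pvUpd_getElem sample e s M j hj2, if_pos (by omega),
        if_pos (by omega)]

-- ======== B side: run decomposition ========
-- stage 2's output for a run list (what the enumerate-foldl computes)
def pvEmit (e s : Int) (runs : List (List (List Int))) : List (List Int) :=
  (PySem.List.enumerate runs).flatMap (fun p => p.2.map (fun row => (e + s * p.1) :: row.tail))

theorem pvInner_foldl (t : Int) (run : List (List Int)) (out0 : List (List Int)) :
    run.foldl (fun out row => out ++ [t :: PySem.List.slice row (some 1) none]) out0
      = out0 ++ run.map (fun row => t :: row.tail) := by
  induction run generalizing out0 with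
  | nil => simp
  | cons r rs ih =>
    rw [List.foldl_cons, ih, List.map_cons, PySem.List.slice_from_one, List.append_assoc]
    rfl

theorem pvEmit_foldl (e s : Int) (runs : List (List (List Int))) (k : Int) (out0 : List (List Int)) :
    (PySem.List.enumerate runs k).foldl
      (fun out (p : Int × List (List Int)) =>
        p.2.foldl (fun out row => out ++ [(e + s * p.1) :: PySem.List.slice row (some 1) none]) out)
      out0
    = out0 ++ (PySem.List.enumerate runs k).flatMap (fun p => p.2.map (fun row => (e + s * p.1) :: row.tail)) := by
  induction runs generalizing k out0 with
  | nil => simp [PySem.List.enumerate_nil]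
  | cons g gs ih =>
    rw [PySem.List.enumerate_cons, List.foldl_cons, pvInner_foldl, ih,
      List.flatMap_cons, List.append_assoc]

theorem pvEmit_snoc (e s : Int) (gs : List (List (List Int))) (g : List (List Int)) :
    pvEmit e s (gs ++ [g]) = pvEmit e s gs ++ g.map (fun row => (e + s * (gs.length : Int)) :: row.tail) := by
  unfold pvEmit
  rw [PySem.List.enumerate_append, List.flatMap_append]
  congr 1
  simp [PySem.List.enumerate_cons, PySem.List.enumerate_nil]

-- B's stage-1 invariant over the first m body rows
theorem pvB_runs (sample : List (List Int)) (e s : Int) (hr : ∀ r ∈ sample, r ≠ [])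
    (m : Nat) (hm : m + 1 ≤ sample.length) :
    let st := (sample.dropLast.take m).foldl pvStep ([], [])
    (m = 0 → st = ([], [])) ∧
    (1 ≤ m →
      st.2 ≠ [] ∧
      PySem.List.pyGetD st.2 (-1) [] = sample.getD (m - 1) [] ∧
      (st.1.length : Int) = (pvCnt sample (m - 1) : Int) ∧
      pvEmit e s (st.1 ++ [st.2])
        = (List.range m).map (fun j => pvNT sample e s j :: (sample.getD j []).tail)) := by
  induction m with
  | zero => exact ⟨fun _ => rfl, fun h => absurd h (by omega)⟩
  | succ m ih =>
    have hm' : m + 1 ≤ sample.length := by omega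
    have hmd : m < sample.dropLast.length := by
      rw [List.length_dropLast]; omega
    have htake : sample.dropLast.take (m + 1) = sample.dropLast.take m ++ [sample.dropLast[m]] := by
      rw [List.take_add_one, List.getElem?_eq_getElem hmd]; rfl
    have hrow : sample.dropLast[m] = sample.getD m [] := by
      rw [List.getElem_dropLast, List.getD_eq_getElem _ _ (by omega)]
    obtain ⟨h0, h1⟩ := ih hm'
    refine ⟨fun h => absurd h (by omega), fun _ => ?_⟩
    rw [htake, List.foldl_append, List.foldl_cons, List.foldl_nil, hrow]
    by_cases hm0 : m = 0
    · -- first row starts the first run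
      subst hm0
      rw [h0 rfl]
      have : pvStep ([], []) (sample.getD 0 []) = ([], [sample.getD 0 []]) := by
        unfold pvStep; simp
      rw [this]
      simp only [Nat.add_sub_cancel]
      refine ⟨by simp, by simp [PySem.List.pyGetD_neg_one], by simp [pvCnt], ?_⟩
      rw [show ([] : List (List (List Int))) ++ [[sample.getD 0 []]] = [] ++ [[sample.getD 0 []]] from rfl,
        pvEmit_snoc]
      simp [pvEmit, PySem.List.enumerate_nil, pvNT, pvCnt]
    · obtain ⟨hc, hlast, hlen, hemit⟩ := h1 (by omega)
      set st := (sample.dropLast.take m).foldl pvStep ([], []) with hst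
      have hmlt : m < sample.length := by omega
      have hm1 : m - 1 < sample.length := by omega
      have hcond : (st.2 ≠ [] ∧
          PySem.List.pyGetD (PySem.List.pyGetD st.2 (-1) []) 0 0 = PySem.List.pyGetD (sample.getD m []) 0 0)
          ↔ (pvFs sample).getD (m - 1) 0 = (pvFs sample).getD m 0 := by
        rw [hlast, ← pvFs_getD sample (m - 1) hm1, ← pvFs_getD sample m hmlt]
        exact ⟨fun h => h.2, fun h => ⟨hc, h⟩⟩
      have hcnt : pvCnt sample m =
          pvCnt sample (m - 1) + (if (pvFs sample).getD (m-1) 0 ≠ (pvFs sample).getD m 0 then 1 else 0) := by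
        have h := pvCnt_succ sample (m - 1)
        rw [show m - 1 + 1 = m from by omega] at h
        exact h
      simp only [Nat.add_sub_cancel]
      unfold pvStep
      by_cases heq : (pvFs sample).getD (m - 1) 0 = (pvFs sample).getD m 0
      · rw [if_pos (hcond.mpr heq)]
        have hcntm : ((pvCnt sample m : Nat) : Int) = (st.1.length : Int) := by
          rw [hcnt, if_neg (not_not_intro heq)]
          push_cast at hlen ⊢
          omega
        refine ⟨by simp, by simp [PySem.List.pyGetD_neg_one], ?_, ?_⟩
        · exact hcntm.symm
        · simp only []
          rw [pvEmit_snoc, List.map_append, ← List.append_assoc, ← pvEmit_snoc, hemit,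
            List.range_succ, List.map_append]
          simp only [List.map_cons, List.map_nil]
          have hv : pvNT sample e s m = e + s * (st.1.length : Int) := by
            unfold pvNT; rw [hcntm]
          rw [hv]
      · rw [if_neg (by rw [hcond]; exact heq)]
        have hcntm : ((pvCnt sample m : Nat) : Int) = (st.1.length : Int) + 1 := by
          rw [hcnt, if_pos heq]
          push_cast at hlen ⊢
          omega
        refine ⟨by simp, by simp [PySem.List.pyGetD_neg_one], ?_, ?_⟩
        · simp only [if_pos hc, List.length_append, List.length_cons, List.length_nil]
          push_cast
          omega
        · simp only [if_pos hc]
          rw [pvEmit_snoc, hemit, List.range_succ, List.map_append]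
          simp only [List.map_cons, List.map_nil]
          have hv : pvNT sample e s m = e + s * ((st.1 ++ [st.2]).length : Int) := by
            unfold pvNT
            rw [hcntm]
            simp only [List.length_append, List.length_cons, List.length_nil]
            push_cast
            ring
          rw [hv]

theorem pvB_eq_ref (sample : List (List Int)) (e s : Int)
    (h0 : sample ≠ []) (hr : ∀ r ∈ sample, r ≠ []) :
    time_fix_sample_alt sample e s = pvRef sample e s := by
  have hn : 1 ≤ sample.length := List.length_pos_of_ne_nil h0
  unfold time_fix_sample_alt
  dsimp only []
  rw [PySem.List.slice_to_neg_one, PySem.List.pyGetD_neg_one _ _ h0]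
  have hlastrow : sample.getLast h0 = sample.getD (sample.length - 1) [] := by
    rw [List.getLast_eq_getElem, List.getD_eq_getElem _ _ (by omega)]
  have hfold : sample.dropLast.foldl pvStep ([], [])
      = (sample.dropLast.take (sample.length - 1)).foldl pvStep ([], []) := by
    rw [List.take_of_length_le (by rw [List.length_dropLast])]
  obtain ⟨hz, hpos⟩ := pvB_runs sample e s hr (sample.length - 1) (by omega)
  by_cases h1 : sample.length = 1
  · -- single row
    have hst : sample.dropLast.foldl pvStep ([], []) = (([], []) : List (List (List Int)) × List (List Int)) := by
      rw [hfold]; exact hz (by omega)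
    rw [hst]
    simp only [ne_eq, not_true_eq_false, if_false, PySem.List.enumerate_nil,
      List.foldl_nil, List.nil_append]
    rw [hlastrow, h1]
    unfold pvRef
    rw [h1]
    simp only [List.range_one, List.map_cons, List.map_nil]
    rw [if_neg (by omega), if_pos trivial, PySem.List.slice_from_one,
      pvFs_getD sample 0 (by omega)]
  · -- at least two rows
    have hM1 : 1 ≤ sample.length - 1 := by omega
    obtain ⟨hc, hlast, hlen, hemit⟩ := hpos hM1
    set st := (sample.dropLast.take (sample.length - 1)).foldl pvStep ([], []) with hst
    rw [hfold, if_pos hc]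
    have hout : (PySem.List.enumerate (st.1 ++ [st.2])).foldl
        (fun out (p : Int × List (List Int)) =>
          p.2.foldl (fun out row => out ++ [(e + s * p.1) :: PySem.List.slice row (some 1) none]) out)
        []
        = (List.range (sample.length - 1)).map
            (fun j => pvNT sample e s j :: (sample.getD j []).tail) := by
      rw [pvEmit_foldl e s (st.1 ++ [st.2]) 0 [], List.nil_append, ← pvEmit, hemit]
    rw [hout]
    set out := (List.range (sample.length - 1)).map
      (fun j => pvNT sample e s j :: (sample.getD j []).tail) with hodef
    have hone : out ≠ [] := by
      simp [hodef, List.map_eq_nil_iff, List.range_eq_nil]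
      omega
    rw [if_pos hone, PySem.List.pyGetD_neg_one _ _ hone]
    have hgl : out.getLast hone = pvNT sample e s (sample.length - 2) :: (sample.getD (sample.length - 2) []).tail := by
      rw [List.getLast_eq_getElem]
      simp only [hodef, List.length_map, List.length_range, List.getElem_map, List.getElem_range]
      congr 2 <;> omega
    rw [hgl, PySem.List.pyGetD_zero_cons, hlastrow, PySem.List.slice_from_one]
    unfold pvRef
    rw [show sample.length = (sample.length - 1) + 1 from by omega, List.range_succ, List.map_append]
    congr 1
    · apply List.map_congr_left
      intro j hj
      rw [List.mem_range] at hj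
      rw [if_pos (by omega)]
    · simp only [List.map_cons, List.map_nil]
      rw [if_neg (by omega), if_neg (by omega)]
      have : sample.length - 1 + 1 - 2 = sample.length - 2 := by omega
      rw [this, show sample.length - 1 + 1 - 1 = sample.length - 1 from by omega]

-- ===== VERDICT (by name: the statement is the Claim_ definition above) =====
theorem time_fix_sample_spec : Claim_equal_time_fix_sample := by
  intro sample e s _hdom hpre
  obtain ⟨h0, hr⟩ := hpre
  unfold Spec_time_fix_sample
  rw [pvA_eq_ref sample e s h0 hr, pvB_eq_ref sample e s h0 hr]
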